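-- pv_equiv track=rewrite | github.com/Ashiq-am/Path-of-Python | 39.Python Programming Examples/5.String Programs/Python program to check whether number formed by combining all elements of the array is palindrome/Method 2.py | joinArray
-- ===== SOURCE A (Python) =====
-- def checkPalindrome(string):
--     # reverse the string
--     rev = string[::-1]
--
--     # checking if string is equal to reverse
--     if (string == rev):
--         return True
--     else:
--         return False
--
-- def joinArray(lis):
--     # defining empty string as number
--     number = ""
--
--     # convert the elements of list to string using type conversion
--     for i in lis:
--         # converting to string
--         i = str(i)
--
--         # concat this to string
--         number = number + i
--
--     # checking if it is palindrome
--     if (checkPalindrome(number)):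
--         return True
--     else:
--         return False
-- ===== SOURCE B (Python) =====
-- def joinArray(lis):
--     # build the joined string, then a two-pointer palindrome scan (no reversed copy)
--     number = "".join(str(i) for i in lis)
--     i, j = 0, len(number) - 1
--     while i < j:
--         if number[i] != number[j]:
--             return False
--         i += 1
--         j -= 1
--     return True
-- ===== Notes on version B (the rewrite author's own statement) =====
-- stated objective: alternative
-- what changed: Concatenation via ''.join, and the reverse-and-compare palindrome check is replaced by an in-place two-pointer scan that short-circuits on the first mismatch and builds no reversed copy.
import Mathlib
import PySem

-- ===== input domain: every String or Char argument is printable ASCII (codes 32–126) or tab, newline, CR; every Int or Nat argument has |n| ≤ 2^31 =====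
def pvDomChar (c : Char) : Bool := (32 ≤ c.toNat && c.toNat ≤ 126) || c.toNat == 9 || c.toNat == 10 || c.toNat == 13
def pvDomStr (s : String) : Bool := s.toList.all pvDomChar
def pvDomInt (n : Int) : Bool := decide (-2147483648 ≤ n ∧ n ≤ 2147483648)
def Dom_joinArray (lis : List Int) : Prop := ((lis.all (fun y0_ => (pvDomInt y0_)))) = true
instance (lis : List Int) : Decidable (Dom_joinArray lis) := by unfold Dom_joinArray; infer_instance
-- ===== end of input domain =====

-- B replaces A's reverse-and-compare palindrome check by a two-pointer scan with early exit (alternative decomposition, same cost).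

-- ===== PORT A =====
-- rev = string[::-1]; slice? with step -1 always returns some (step ≠ 0), so getD [] never fires
def checkPalindromeA (cs : List Char) : Bool :=
  let rev := (PySem.List.slice? cs none none (-1)).getD []
  if cs = rev then true else false

def joinArray (lis : List Int) : Bool :=
  let number := lis.foldl (fun acc i => acc ++ PySem.Int.toChars i) []
  if checkPalindromeA number then true else false

-- ===== PORT B =====
-- while i < j: compare number[i] with number[j]; indices stay in [0, len) so getD is exact here
def tpLoop (cs : List Char) (i j : Nat) : Bool :=
  if i < j then
    if cs.getD i ' ' ≠ cs.getD j ' ' then false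
    else tpLoop cs (i + 1) (j - 1)
  else true
termination_by j - i

def joinArray_alt (lis : List Int) : Bool :=
  let number := PySem.Chars.join [] (lis.map PySem.Int.toChars)
  tpLoop number 0 (number.length - 1)

-- ===== PRECONDITION & SPEC =====
def Spec_joinArray (lis : List Int) (out : Bool) : Prop := out = joinArray_alt lis
instance (lis : List Int) (out : Bool) : Decidable (Spec_joinArray lis out) := by unfold Spec_joinArray; infer_instance

-- ===== CLAIM (what is proved, stated in full; the proofs are below) =====
def Claim_equal_joinArray : Prop := ∀ (lis : List Int), Dom_joinArray lis → Spec_joinArray lis (joinArray lis)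

-- ===== LEMMAS AND PROOFS =====

theorem join_nil_flatten (l : List (List Char)) : PySem.Chars.join [] l = l.flatten := by
  show [].intercalate l = l.flatten
  rw [List.intercalate]
  induction l with
  | nil => rfl
  | cons a t ih => cases t <;> simp_all [List.intersperse]

theorem tpLoop_iff (cs : List Char) (i j : Nat) :
    tpLoop cs i j = true ↔ ∀ k, i ≤ k → 2 * k < i + j → cs.getD k ' ' = cs.getD (i + j - k) ' ' := by
  induction i, j using tpLoop.induct cs with
  | case1 i j hij hne =>
      rw [tpLoop]
      simp only [if_pos hij, if_pos hne]
      constructor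
      · intro h; cases h
      · intro h
        exact absurd (h i le_rfl (by omega)) (by simpa using hne)
  | case2 i j hij hne ih =>
      rw [tpLoop]
      simp only [if_pos hij, if_neg hne]
      rw [ih]
      constructor
      · intro h k hk h2
        rcases Nat.eq_or_lt_of_le hk with rfl | hk'
        · rw [show i + j - i = j by omega]
          exact not_not.mp hne
        · have := h k hk' (by omega)
          rwa [show i + 1 + (j - 1) - k = i + j - k by omega] at this
      · intro h k hk h2
        have := h k (by omega) (by omega)
        rwa [show i + 1 + (j - 1) - k = i + j - k by omega]
  | case3 i j hij =>
      rw [tpLoop, if_neg hij]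
      constructor
      · intro _ k hk h2; omega
      · intro _; rfl

theorem pal_iff (cs : List Char) :
    cs = cs.reverse ↔ ∀ k, 2 * k < cs.length - 1 → cs.getD k ' ' = cs.getD (cs.length - 1 - k) ' ' := by
  constructor
  · intro h k h2
    have hk : k < cs.length := by omega
    have hk2 : cs.length - 1 - k < cs.length := by omega
    calc cs.getD k ' ' = cs.reverse.getD k ' ' := by rw [← h]
      _ = cs.getD (cs.length - 1 - k) ' ' := by
          rw [List.getD_eq_getElem _ ' ' (by simpa using hk), List.getD_eq_getElem cs ' ' hk2,
            List.getElem_reverse]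
  · intro h
    have key : ∀ m, m < cs.length → cs.getD m ' ' = cs.getD (cs.length - 1 - m) ' ' := by
      intro m hm
      rcases lt_trichotomy (2 * m) (cs.length - 1) with h2 | h2 | h2
      · exact h m h2
      · have hme : m = cs.length - 1 - m := by omega
        rw [← hme]
      · have hlt : 2 * (cs.length - 1 - m) < cs.length - 1 := by omega
        have := h _ hlt
        rw [show cs.length - 1 - (cs.length - 1 - m) = m from by omega] at this
        exact this.symm
    apply List.ext_getElem (by simp)
    intro k hk hk'
    have := key k hk
    rw [List.getD_eq_getElem cs ' ' hk, List.getD_eq_getElem cs ' ' (by omega)] at this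
    rw [List.getElem_reverse]
    exact this

theorem tpLoop_eq_palindrome (cs : List Char) :
    tpLoop cs 0 (cs.length - 1) = decide (cs = cs.reverse) := by
  have h : tpLoop cs 0 (cs.length - 1) = true ↔ cs = cs.reverse := by
    rw [tpLoop_iff, pal_iff]
    simp only [Nat.zero_add, Nat.zero_le, true_implies]
  by_cases hp : cs = cs.reverse
  · rw [h.mpr hp, decide_eq_true hp]
  · have ht : tpLoop cs 0 (cs.length - 1) ≠ true := fun ht => hp (h.mp ht)
    rw [Bool.eq_false_iff.mpr ht, decide_eq_false hp]

theorem checkPalindromeA_eq (cs : List Char) :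
    checkPalindromeA cs = decide (cs = cs.reverse) := by
  unfold checkPalindromeA
  rw [PySem.List.slice?_none_none_neg_one]
  by_cases h : cs = cs.reverse
  · rw [decide_eq_true h]
    simp only [Option.getD_some, if_pos h]
  · rw [decide_eq_false h]
    simp only [Option.getD_some, if_neg h]

-- ===== VERDICT (by name: the statement is the Claim_ definition above) =====
theorem joinArray_spec : Claim_equal_joinArray := by
  intro lis _
  simp only [Spec_joinArray, joinArray, joinArray_alt]
  rw [PySem.List.foldl_append_eq_flatMap, join_nil_flatten, ← List.flatMap_def]
  simp only [List.nil_append, checkPalindromeA_eq, tpLoop_eq_palindrome]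
  by_cases h : lis.flatMap PySem.Int.toChars = (lis.flatMap PySem.Int.toChars).reverse
  · rw [decide_eq_true h]
    rfl
  · rw [decide_eq_false h]
    rfl
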